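-- pv_equiv track=rewrite | github.com/ps5/codejam | 2022/round1a/double_or_one_thing.py | solve
-- ===== SOURCE A (Python) =====
-- def solve(S):
--
--     s = ""
--     for i in range(1, len(S)):
--         s += S[i-1]
--         if S[i-1]<S[i]:
--             s += S[i-1] # once again (highlight)
--             # special case: PEEL
--             if S[i]>S[i-1]: # L > E
--                 x = S[i-1] # E
--                 ii = i-2
--                 ss = "" # highlight all previous Es
--                 while (S[ii] == x and ii >= 0):
--                     ss += x
--                     ii -= 1
--                 s += ss
--
--     s += S[-1:]
--     return ("%s" % (s))
-- ===== SOURCE B (Python) =====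
-- def solve(S):
--     # One pass maintaining the current run (char, length); emit each finished run,
--     # doubled when the following character is greater than the run's character.
--     pieces = []
--     prev = None
--     run = 0
--     for c in S:
--         if c == prev:
--             run += 1
--         else:
--             if prev is not None:
--                 pieces.append(prev * (2 * run if c > prev else run))
--             prev = c
--             run = 1
--     if prev is not None:
--         pieces.append(prev * run)
--     return ''.join(pieces)
-- ===== Notes on version B (the rewrite author's own statement) =====
-- stated objective: simpler
-- what changed: Replaces A's indexed char-by-char scan with a backward rescan of each run at every run boundary by a single forward pass that tracks the current run (char, length) and emits each finished run doubled when the next character is greater.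
import Mathlib
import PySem

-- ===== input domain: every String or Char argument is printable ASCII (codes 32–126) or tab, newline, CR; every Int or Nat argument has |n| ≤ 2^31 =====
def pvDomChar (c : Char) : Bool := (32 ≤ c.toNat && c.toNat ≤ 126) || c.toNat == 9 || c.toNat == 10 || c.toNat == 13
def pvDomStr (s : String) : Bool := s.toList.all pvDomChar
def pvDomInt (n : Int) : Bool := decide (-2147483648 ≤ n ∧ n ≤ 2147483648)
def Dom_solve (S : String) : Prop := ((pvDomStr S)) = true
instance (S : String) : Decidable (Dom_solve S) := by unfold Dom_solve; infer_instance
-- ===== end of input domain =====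

-- B replaces A's indexed char-by-char scan with a backward rescan per run by one forward
-- pass tracking the current run (char, length); same return value, simpler shape.

-- ===== PORT A =====
-- the inner 'while S[ii] == x and ii >= 0': ss accumulates x while the char at ii equals x.
-- ii may be -1: Python reads S[-1] (always valid when reached from solve, where len(S) ≥ 2)
-- and then stops on 'ii >= 0'; pyGet? is exact here, the none branch is Python's IndexError.
def solvePeel (cs : List Char) (x : Char) (ii : Int) (ss : List Char) : List Char :=
  match PySem.List.pyGet? cs ii with
  | some ch =>
    if h : ch = x ∧ 0 ≤ ii then solvePeel cs x (ii - 1) (ss ++ [x]) else ss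
  | none => ss
termination_by (ii + 1).toNat
decreasing_by omega

-- one iteration of 'for i in range(1, len(S))'
def solveStep (cs : List Char) (s : List Char) (i : Int) : List Char :=
  match PySem.List.pyGet? cs (i - 1), PySem.List.pyGet? cs i with
  | some p, some c =>
    let s1 := s ++ [p]                                  -- s += S[i-1]
    if p < c then
      let s2 := s1 ++ [p]                               -- s += S[i-1] (once again)
      if c > p then s2 ++ solvePeel cs p (i - 2) []     -- s += ss
      else s2
    else s1
  | _, _ => s  -- IndexError; unreachable for i in range(1, len(S))

def solve (S : String) : String :=
  let cs := S.toList
  let s := (PySem.List.pyRange 1 (cs.length : Int) 1).foldl (solveStep cs) []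
  String.ofList (s ++ PySem.List.slice cs (some (-1)) none)   -- s += S[-1:]

-- ===== PORT B =====
-- loop body of Source B's single for-loop; state (pieces, prev, run)
def altStep (st : List Char × Option Char × Nat) (c : Char) : List Char × Option Char × Nat :=
  match st with
  | (pieces, prev, run) =>
    if some c = prev then (pieces, prev, run + 1)
    else
      match prev with
      | some p => (pieces ++ List.replicate (if p < c then 2 * run else run) p, some c, 1)
      | none => (pieces, some c, 1)

def solve_alt (S : String) : String :=
  match S.toList.foldl altStep ([], none, 0) with
  | (pieces, some p, run) => String.ofList (pieces ++ List.replicate run p)  -- final flush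
  | (pieces, none, _) => String.ofList pieces

-- ===== PRECONDITION & SPEC =====
def Spec_solve (S : String) (out : String) : Prop := out = solve_alt S
instance (S : String) (out : String) : Decidable (Spec_solve S out) := by unfold Spec_solve; infer_instance

-- ===== CLAIM (what is proved, stated in full; the proofs are below) =====
def Claim_equal_solve : Prop := ∀ (S : String), Dom_solve S → Spec_solve S (solve S)

-- ===== LEMMAS AND PROOFS =====

-- the accumulator of solvePeel is a prefix of its result
theorem solvePeel_acc (cs : List Char) (x : Char) (ii : Int) (ss : List Char) :
    solvePeel cs x ii ss = ss ++ solvePeel cs x ii [] := by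
  generalize hn : (ii + 1).toNat = n
  induction n using Nat.strong_induction_on generalizing ii ss with
  | _ n IH =>
    rw [solvePeel]; conv_rhs => rw [solvePeel]
    cases hg : PySem.List.pyGet? cs ii with
    | none => simp
    | some ch =>
      by_cases h : ch = x ∧ 0 ≤ ii
      · simp only [dif_pos h]
        rw [IH ((ii - 1) + 1).toNat (by omega) (ii - 1) (ss ++ [x]) rfl,
            IH ((ii - 1) + 1).toNat (by omega) (ii - 1) ([] ++ [x]) rfl]
        simp
      · simp [dif_neg h]

-- one unfolding of solvePeel at a nonnegative in-range index
theorem solvePeel_nat (cs : List Char) (x : Char) (k : Nat) (hk : k < cs.length) :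
    solvePeel cs x (k : Int) [] =
      if cs[k] = x then x :: solvePeel cs x ((k : Int) - 1) [] else [] := by
  rw [solvePeel]
  rw [show PySem.List.pyGet? cs (k : Int) = some cs[k] by
    rw [PySem.List.pyGet?_natCast, List.getElem?_eq_getElem hk]]
  by_cases h : cs[k] = x
  · simp only [if_pos h, dif_pos (⟨h, by omega⟩ : cs[k] = x ∧ (0:Int) ≤ (k:Int))]
    rw [solvePeel_acc]; simp
  · simp [h]

-- the backward scan stops at once when started at index -1 ('and ii >= 0' is False)
theorem solvePeel_neg_one (cs : List Char) (x : Char) :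
    solvePeel cs x (-1) [] = [] := by
  rw [solvePeel]
  cases hg : PySem.List.pyGet? cs (-1) with
  | none => simp
  | some ch => simp

-- main invariant: after A's loop has processed indices 1..k, with B's fold over the first
-- k+1 chars in state (pieces, some cs[k], run): A's accumulator is pieces ++ replicate (run-1) cs[k],
-- and the backward peel from k-1 yields replicate (run-1) cs[k].
theorem main_inv (cs : List Char) (k : Nat) (hk : k < cs.length) :
    ∃ pieces run, 1 ≤ run ∧
      (cs.take (k+1)).foldl altStep ([], none, 0) = (pieces, some cs[k], run) ∧
      (PySem.List.pyRange 1 ((k : Int) + 1) 1).foldl (solveStep cs) [] =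
        pieces ++ List.replicate (run - 1) cs[k] ∧
      solvePeel cs cs[k] ((k : Int) - 1) [] = List.replicate (run - 1) cs[k] := by
  induction k with
  | zero =>
    refine ⟨[], 1, le_refl 1, ?_, ?_, ?_⟩
    · cases cs with
      | nil => simp at hk
      | cons c0 t => simp [altStep]
    · rw [PySem.List.pyRange_one_eq_nil (by omega)]; simp
    · simpa using solvePeel_neg_one cs cs[0]
  | succ k IH =>
    obtain ⟨pieces, run, hrun, hB, hA, hP⟩ := IH (by omega)
    have hget : cs[k+1]? = some cs[k+1] := List.getElem?_eq_getElem hk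
    have htake : cs.take (k+1+1) = cs.take (k+1) ++ [cs[k+1]] := by
      rw [List.take_add_one, hget]; rfl
    have hBstep : (cs.take (k+1+1)).foldl altStep ([], none, 0) =
        altStep (pieces, some cs[k], run) cs[k+1] := by
      rw [htake, List.foldl_append, hB]; rfl
    have hg1 : PySem.List.pyGet? cs ((k : Int) + 1 - 1) = some cs[k] := by
      rw [show ((k : Int) + 1 - 1) = ((k : Nat) : Int) by ring,
        PySem.List.pyGet?_natCast, List.getElem?_eq_getElem (by omega)]
    have hg2 : PySem.List.pyGet? cs ((k : Int) + 1) = some cs[k+1] := by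
      rw [show ((k : Int) + 1) = (((k+1 : Nat)) : Int) by push_cast; ring,
        PySem.List.pyGet?_natCast, hget]
    have hAstep : List.foldl (solveStep cs) [] (PySem.List.pyRange 1 ((↑(k+1) : Int) + 1)) =
        solveStep cs (pieces ++ List.replicate (run - 1) cs[k]) ((k : Int) + 1) := by
      rw [show ((↑(k+1) : Int) + 1) = ((k : Int) + 1) + 1 by push_cast; ring,
        PySem.List.pyRange_one_succ_right (by omega), List.foldl_append, hA]
      rfl
    have hi2 : ((k : Int) + 1 - 2) = (k : Int) - 1 := by ring
    have hi1 : ((↑(k+1) : Int) - 1) = (k : Int) := by push_cast; ring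
    have hrepl : List.replicate (run - 1) cs[k] ++ [cs[k]] = List.replicate run cs[k] := by
      rw [← List.replicate_succ']; congr 1; omega
    by_cases hcp : cs[k+1] = cs[k]
    · refine ⟨pieces, run + 1, by omega, ?_, ?_, ?_⟩
      · rw [hBstep]; simp [altStep, hcp]
      · rw [hAstep]
        simp only [solveStep, hg1, hg2, hcp, lt_irrefl, if_false]
        rw [List.append_assoc, hrepl]
        congr 2
      · rw [hi1, hcp, solvePeel_nat cs cs[k] k (by omega), if_pos rfl, hP]
        rw [show run + 1 - 1 = (run - 1) + 1 by omega, List.replicate_succ]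
    · refine ⟨pieces ++ List.replicate (if cs[k] < cs[k+1] then 2 * run else run) cs[k],
        1, le_refl 1, ?_, ?_, ?_⟩
      · rw [hBstep]
        simp only [altStep]
        rw [if_neg (by simpa using hcp)]
      · rw [hAstep]
        simp only [solveStep, hg1, hg2, hi2, hP]
        by_cases hlt : cs[k] < cs[k+1]
        · rw [if_pos hlt, if_pos hlt, if_pos (by exact hlt)]
          simp only [List.replicate, List.append_assoc]
          rw [show (2 * run) = (run - 1) + (1 + (1 + (run - 1))) by omega]
          simp [List.replicate_add, List.replicate_succ]
        · rw [if_neg hlt, if_neg hlt]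
          rw [List.append_assoc, hrepl]
          simp
      · rw [hi1, solvePeel_nat cs cs[k+1] k (by omega),
          if_neg (fun h => hcp h.symm)]
        simp

-- ===== VERDICT (by name: the statement is the Claim_ definition above) =====
theorem solve_spec : Claim_equal_solve := by
  intro S _
  unfold Spec_solve solve solve_alt
  cases hcs : S.toList.length with
  | zero =>
    have h0 : S.toList = [] := List.eq_nil_of_length_eq_zero hcs
    rw [h0]
    rfl
  | succ m =>
    have hm : m < S.toList.length := by omega
    obtain ⟨pieces, run, hrun, hB, hA, hP⟩ := main_inv S.toList m hm
    rw [List.take_of_length_le (by omega)] at hB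
    have hslice : PySem.List.slice S.toList (some (-1)) none = [S.toList[m]] := by
      rw [PySem.List.slice_from_neg_one, hcs, Nat.add_sub_cancel,
        List.drop_eq_getElem_cons hm]
      rw [List.drop_eq_nil_of_le (by omega)]
    rw [hB]
    show String.ofList ((PySem.List.pyRange 1 (S.toList.length : Int) 1).foldl
        (solveStep S.toList) [] ++ PySem.List.slice S.toList (some (-1)) none)
      = String.ofList (pieces ++ List.replicate run S.toList[m])
    rw [hslice,
      show ((S.toList.length : Nat) : Int) = ((m : Int) + 1) by rw [hcs]; push_cast; ring,
      hA, List.append_assoc,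
      show List.replicate (run - 1) S.toList[m] ++ [S.toList[m]]
          = List.replicate run S.toList[m] by
        rw [← List.replicate_succ']; congr 1; omega]
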